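-- pv_equiv track=rewrite | github.com/AzadRojoa/Carte-bande-test-Ynov | lcd.py | char_to_lcd_code_extended
-- ===== SOURCE A (Python) =====
-- def char_to_lcd_code_extended(c):
--     special = ["!","\"","#","$","%","&","\'","(",")","*","+",",","-",".","/","`"]
--     if 'a' <= c <= 'o':
--         return 81 + ord(c) - ord('a')
--     elif 'p' <= c <= 'z':
--         return 208 + ord(c) - ord('p')
--     if 'A' <= c <= 'O':
--         return 17 + ord(c) - ord('A')
--     elif 'P' <= c <= 'Z':
--         return 144 + ord(c) - ord('P')
--     elif '0' <= c <= '9':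
--         return 192 + ord(c) - ord('0')
--     else:
--         for i,valeur in enumerate(special):
--             if valeur == c :
--                 return 65 +i
--             else :
--                 return 300
-- ===== SOURCE B (Python) =====
-- SPECIAL = ["!", "\"", "#", "$", "%", "&", "'", "(", ")", "*", "+", ",", "-", ".", "/", "`"]
--
-- RANGES = [('a', 'o', 81), ('p', 'z', 208), ('A', 'O', 17), ('P', 'Z', 144), ('0', '9', 192)]
--
--
-- def char_to_lcd_code_extended(c):
--     for lo, hi, base in RANGES:
--         if lo <= c <= hi:
--             return base + ord(c) - ord(lo)
--     if c in SPECIAL: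
--         return 65 + SPECIAL.index(c)
--     return 300
-- ===== Notes on version B (the rewrite author's own statement) =====
-- stated objective: simpler
-- what changed: Replaces the five-branch if/elif chain by a loop over a (low,high,base) range table and replaces the broken enumerate-loop over the special list by a plain membership test plus list.index.
-- intended difference: On the 15 special characters after '!' (" # $ % & ' ( ) * + , - . / `) A's loop returns 300 because its else-branch returns on the first mismatch, while B returns the intended LCD code 65+index of the character in the special list. — e.g. on char_to_lcd_code_extended("-"): A returns 300, B returns 77
import Mathlib
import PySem

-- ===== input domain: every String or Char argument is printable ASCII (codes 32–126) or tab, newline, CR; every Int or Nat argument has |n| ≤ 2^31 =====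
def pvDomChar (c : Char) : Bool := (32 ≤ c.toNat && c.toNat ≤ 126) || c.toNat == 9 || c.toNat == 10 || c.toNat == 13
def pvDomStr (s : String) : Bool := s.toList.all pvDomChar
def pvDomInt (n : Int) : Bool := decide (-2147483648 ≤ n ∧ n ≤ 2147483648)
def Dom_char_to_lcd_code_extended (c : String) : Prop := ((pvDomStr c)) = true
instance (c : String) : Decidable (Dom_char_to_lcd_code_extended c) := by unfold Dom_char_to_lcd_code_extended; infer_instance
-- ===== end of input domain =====

-- B replaces A's if/elif chain by a range table and A's broken special-character loop by a
-- membership test + index (simpler); on the 15 special characters after "!" B returns the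
-- intended code where A's loop accidentally returns 300 (stated in D_ below).


-- ===== PORT A =====

-- Python string `<=` is lexicographic comparison of code points; no PySem primitive covers it,
-- so it is hand-ported here (exact for all strings, since Python compares code points).
def pyStrLe : List Char → List Char → Bool
  | [], _ => true
  | _ :: _, [] => false
  | x :: xs, y :: ys =>
    if x.toNat < y.toNat then true
    else if y.toNat < x.toNat then false
    else pyStrLe xs ys

-- ord(c): exact for one-character strings; Python raises TypeError otherwise (excluded by Pre_).
def pyOrd : List Char → Int
  | [ch] => ch.toNat
  | _ => 0

def pvSpecialList : List String :=
  ["!", "\"", "#", "$", "%", "&", "'", "(", ")", "*", "+", ",", "-", ".", "/", "`"]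

-- A's for-loop over `special`: on every iteration it returns (65+i on a match, 300 otherwise);
-- the [] arm is unreachable for the nonempty literal (Python would fall off and return None).
def pvSpecialLoopA (c : String) : Nat → List String → Int
  | _, [] => 300
  | i, v :: _ => if v = c then 65 + (i : Int) else 300

def char_to_lcd_code_extended (c : String) : Int :=
  let cl := c.toList
  if pyStrLe ['a'] cl && pyStrLe cl ['o'] then 81 + pyOrd cl - 97
  else if pyStrLe ['p'] cl && pyStrLe cl ['z'] then 208 + pyOrd cl - 112
  else if pyStrLe ['A'] cl && pyStrLe cl ['O'] then 17 + pyOrd cl - 65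
  else if pyStrLe ['P'] cl && pyStrLe cl ['Z'] then 144 + pyOrd cl - 80
  else if pyStrLe ['0'] cl && pyStrLe cl ['9'] then 192 + pyOrd cl - 48
  else pvSpecialLoopA c 0 pvSpecialList

-- ===== PORT B =====

def pvRanges : List (Char × Char × Int) :=
  [('a', 'o', 81), ('p', 'z', 208), ('A', 'O', 17), ('P', 'Z', 144), ('0', '9', 192)]

def pvRangeLoop (cl : List Char) : List (Char × Char × Int) → Option Int
  | [] => none
  | (lo, hi, base) :: rest =>
    if pyStrLe [lo] cl && pyStrLe cl [hi] then some (base + pyOrd cl - (lo.toNat : Int))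
    else pvRangeLoop cl rest

def char_to_lcd_code_extended_alt (c : String) : Int :=
  match pvRangeLoop c.toList pvRanges with
  | some r => r
  | none =>
    match PySem.List.index? pvSpecialList c with
    | some i => 65 + (i : Int)
    | none => 300

-- ===== PRECONDITION & SPEC =====

def pvRaisyHead (ch : Char) : Bool :=
  ('a' ≤ ch && ch ≤ 'n') || ('p' ≤ ch && ch ≤ 'y') || ('A' ≤ ch && ch ≤ 'N') ||
  ('P' ≤ ch && ch ≤ 'Y') || ('0' ≤ ch && ch ≤ '8')

-- Pre_ excludes exactly the multi-character strings whose first character makes a lexicographic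
-- range test succeed: there both Pythons raise TypeError at ord(c).
def Pre_char_to_lcd_code_extended (c : String) : Prop :=
  c.toList.length ≤ 1 ∨ pvRaisyHead c.toList.headI = false
instance (c : String) : Decidable (Pre_char_to_lcd_code_extended c) := by
  unfold Pre_char_to_lcd_code_extended; infer_instance

def pvWitness_char_to_lcd_code_extended : String := "a"

-- On the 15 special characters after "!" A's else-loop returns 300 on its first mismatching
-- iteration, while B returns the intended LCD code 65 + index of the character in the list.
def D_char_to_lcd_code_extended (c : String) : Prop :=
  c.toList.length = 1 ∧
    ((34 ≤ c.toList.headI.toNat ∧ c.toList.headI.toNat ≤ 47) ∨ c.toList.headI.toNat = 96)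
instance (c : String) : Decidable (D_char_to_lcd_code_extended c) := by
  unfold D_char_to_lcd_code_extended; infer_instance

def Spec_char_to_lcd_code_extended (c : String) (out : Int) : Prop :=
  ¬ D_char_to_lcd_code_extended c → out = char_to_lcd_code_extended_alt c
instance (c : String) (out : Int) : Decidable (Spec_char_to_lcd_code_extended c out) := by
  unfold Spec_char_to_lcd_code_extended; infer_instance

def pvDiffWitness_char_to_lcd_code_extended : String := "-"
def pvDiffWitnessOut_char_to_lcd_code_extended : Int × Int := (300, 77)

-- ===== CLAIM (what is proved, stated in full; the proofs are below) =====
def Claim_unchanged_char_to_lcd_code_extended : Prop := ∀ (c : String), Dom_char_to_lcd_code_extended c → Pre_char_to_lcd_code_extended c → Spec_char_to_lcd_code_extended c (char_to_lcd_code_extended c)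
def Claim_changed_char_to_lcd_code_extended : Prop := Dom_char_to_lcd_code_extended (pvDiffWitness_char_to_lcd_code_extended) ∧ Pre_char_to_lcd_code_extended (pvDiffWitness_char_to_lcd_code_extended) ∧ D_char_to_lcd_code_extended (pvDiffWitness_char_to_lcd_code_extended) ∧ char_to_lcd_code_extended (pvDiffWitness_char_to_lcd_code_extended) = pvDiffWitnessOut_char_to_lcd_code_extended.1 ∧ char_to_lcd_code_extended_alt (pvDiffWitness_char_to_lcd_code_extended) = pvDiffWitnessOut_char_to_lcd_code_extended.2 ∧ pvDiffWitnessOut_char_to_lcd_code_extended.1 ≠ pvDiffWitnessOut_char_to_lcd_code_extended.2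
def Claim_exact_char_to_lcd_code_extended : Prop := ∀ (c : String), Dom_char_to_lcd_code_extended c → Pre_char_to_lcd_code_extended c → D_char_to_lcd_code_extended c → char_to_lcd_code_extended c ≠ char_to_lcd_code_extended_alt c

-- ===== LEMMAS AND PROOFS =====

theorem pv_unchanged : ∀ (c : String), Pre_char_to_lcd_code_extended c →
    ¬ D_char_to_lcd_code_extended c →
    char_to_lcd_code_extended c = char_to_lcd_code_extended_alt c := by
  intro c _ hD
  unfold char_to_lcd_code_extended char_to_lcd_code_extended_alt
  simp only [pvRanges, pvRangeLoop]
  split_ifs with h1 h2 h3 h4 h5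
  · rfl
  · rfl
  · rfl
  · rfl
  · rfl
  · by_cases hc : c = "!"
    · subst hc; decide
    · have hnot : c ∉ pvSpecialList := by
        intro hmem
        simp only [pvSpecialList, List.mem_cons, List.not_mem_nil, or_false] at hmem
        rcases hmem with rfl|rfl|rfl|rfl|rfl|rfl|rfl|rfl|rfl|rfl|rfl|rfl|rfl|rfl|rfl|rfl
        · exact hc rfl
        all_goals exact hD (by decide)
      rw [(PySem.List.index?_eq_none_iff _ _).2 hnot]
      simp [pvSpecialLoopA, pvSpecialList, Ne.symm hc]

-- ===== VERDICT (by name: the statement is the Claim_ definition above) =====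
theorem char_to_lcd_code_extended_spec : Claim_unchanged_char_to_lcd_code_extended := by
  intro c _ hpre hD
  exact pv_unchanged c hpre hD

theorem char_to_lcd_code_extended_changed : Claim_changed_char_to_lcd_code_extended := by
  unfold Claim_changed_char_to_lcd_code_extended; decide

theorem char_to_lcd_code_extended_tight : Claim_exact_char_to_lcd_code_extended := by
  unfold Claim_exact_char_to_lcd_code_extended
  intro c _ _ hD
  obtain ⟨hlen, hcode⟩ := hD
  rcases heq : c.toList with _ | ⟨ch, _ | ⟨d, t⟩⟩
  · rw [heq] at hlen; simp at hlen
  · rw [heq] at hcode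
    simp only [List.headI] at hcode
    have h15 : ch.toNat = 34 ∨ ch.toNat = 35 ∨ ch.toNat = 36 ∨ ch.toNat = 37 ∨ ch.toNat = 38 ∨
        ch.toNat = 39 ∨ ch.toNat = 40 ∨ ch.toNat = 41 ∨ ch.toNat = 42 ∨ ch.toNat = 43 ∨
        ch.toNat = 44 ∨ ch.toNat = 45 ∨ ch.toNat = 46 ∨ ch.toNat = 47 ∨ ch.toNat = 96 := by omega
    clear hcode hlen
    rcases h15 with h|h|h|h|h|h|h|h|h|h|h|h|h|h|h
    · have hch : ch = '"' := Char.ext (UInt32.toNat_inj.mp h)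
      have hcs : c = "\"" := String.toList_inj.mp (by rw [heq, hch]; decide)
      rw [hcs]; decide
    · have hch : ch = '#' := Char.ext (UInt32.toNat_inj.mp h)
      have hcs : c = "#" := String.toList_inj.mp (by rw [heq, hch]; decide)
      rw [hcs]; decide
    · have hch : ch = '$' := Char.ext (UInt32.toNat_inj.mp h)
      have hcs : c = "$" := String.toList_inj.mp (by rw [heq, hch]; decide)
      rw [hcs]; decide
    · have hch : ch = '%' := Char.ext (UInt32.toNat_inj.mp h)
      have hcs : c = "%" := String.toList_inj.mp (by rw [heq, hch]; decide)
      rw [hcs]; decide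
    · have hch : ch = '&' := Char.ext (UInt32.toNat_inj.mp h)
      have hcs : c = "&" := String.toList_inj.mp (by rw [heq, hch]; decide)
      rw [hcs]; decide
    · have hch : ch = '\'' := Char.ext (UInt32.toNat_inj.mp h)
      have hcs : c = "'" := String.toList_inj.mp (by rw [heq, hch]; decide)
      rw [hcs]; decide
    · have hch : ch = '(' := Char.ext (UInt32.toNat_inj.mp h)
      have hcs : c = "(" := String.toList_inj.mp (by rw [heq, hch]; decide)
      rw [hcs]; decide
    · have hch : ch = ')' := Char.ext (UInt32.toNat_inj.mp h)
      have hcs : c = ")" := String.toList_inj.mp (by rw [heq, hch]; decide)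
      rw [hcs]; decide
    · have hch : ch = '*' := Char.ext (UInt32.toNat_inj.mp h)
      have hcs : c = "*" := String.toList_inj.mp (by rw [heq, hch]; decide)
      rw [hcs]; decide
    · have hch : ch = '+' := Char.ext (UInt32.toNat_inj.mp h)
      have hcs : c = "+" := String.toList_inj.mp (by rw [heq, hch]; decide)
      rw [hcs]; decide
    · have hch : ch = ',' := Char.ext (UInt32.toNat_inj.mp h)
      have hcs : c = "," := String.toList_inj.mp (by rw [heq, hch]; decide)
      rw [hcs]; decide
    · have hch : ch = '-' := Char.ext (UInt32.toNat_inj.mp h)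
      have hcs : c = "-" := String.toList_inj.mp (by rw [heq, hch]; decide)
      rw [hcs]; decide
    · have hch : ch = '.' := Char.ext (UInt32.toNat_inj.mp h)
      have hcs : c = "." := String.toList_inj.mp (by rw [heq, hch]; decide)
      rw [hcs]; decide
    · have hch : ch = '/' := Char.ext (UInt32.toNat_inj.mp h)
      have hcs : c = "/" := String.toList_inj.mp (by rw [heq, hch]; decide)
      rw [hcs]; decide
    · have hch : ch = '`' := Char.ext (UInt32.toNat_inj.mp h)
      have hcs : c = "`" := String.toList_inj.mp (by rw [heq, hch]; decide)
      rw [hcs]; decide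
  · rw [heq] at hlen; simp at hlen
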